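-- pv_equiv track=rewrite | github.com/phamtho034ls/RAGCHATBOTV2 | backend/scripts/eda_intents_datajson.py | _summarize_flags
-- ===== SOURCE A (Python) =====
-- from collections import Counter, defaultdict
-- from typing import Any, Dict, List, Tuple
--
-- def _summarize_flags(bundles: List[Dict[str, Any]]) -> Dict[str, Any]:
--     key_counts: Dict[str, Counter] = {}
--     for k in ("is_legal_lookup", "use_multi_article", "needs_expansion"):
--         c = Counter()
--         for b in bundles:
--             rf = b.get("rag_flags") or {}
--             c[str(bool(rf.get(k, False)))] += 1
--         key_counts[k] = c
--     return {k: dict(v) for k, v in key_counts.items()}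
-- ===== SOURCE B (Python) =====
-- from collections import Counter
--
--
-- def _summarize_flags(bundles):
--     # Single pass over bundles, maintaining one Counter per flag name.
--     c_legal = Counter()
--     c_multi = Counter()
--     c_exp = Counter()
--     for b in bundles:
--         rf = b.get("rag_flags") or {}
--         c_legal[str(bool(rf.get("is_legal_lookup", False)))] += 1
--         c_multi[str(bool(rf.get("use_multi_article", False)))] += 1
--         c_exp[str(bool(rf.get("needs_expansion", False)))] += 1
--     return {
--         "is_legal_lookup": dict(c_legal),
--         "use_multi_article": dict(c_multi),
--         "needs_expansion": dict(c_exp),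
--     }
-- ===== Notes on version B (the rewrite author's own statement) =====
-- stated objective: alternative
-- what changed: B makes a single pass over bundles maintaining three named Counters (one per flag) instead of A's three separate scans of bundles, one per flag key.
import Mathlib
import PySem

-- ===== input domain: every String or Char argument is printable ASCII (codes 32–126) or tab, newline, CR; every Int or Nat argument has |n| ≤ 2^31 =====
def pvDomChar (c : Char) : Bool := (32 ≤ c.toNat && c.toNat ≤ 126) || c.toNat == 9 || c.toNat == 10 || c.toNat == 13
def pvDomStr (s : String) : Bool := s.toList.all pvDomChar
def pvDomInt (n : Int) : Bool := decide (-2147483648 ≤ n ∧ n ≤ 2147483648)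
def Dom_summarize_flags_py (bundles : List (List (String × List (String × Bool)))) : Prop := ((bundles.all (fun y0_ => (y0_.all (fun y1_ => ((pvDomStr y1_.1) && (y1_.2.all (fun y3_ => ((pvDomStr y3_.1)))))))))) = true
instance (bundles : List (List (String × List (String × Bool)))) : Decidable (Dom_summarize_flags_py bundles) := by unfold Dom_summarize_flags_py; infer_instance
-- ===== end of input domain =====

-- B replaces A's three separate scans of `bundles` (one per flag key) by a single pass
-- maintaining three counters; same return value (RETURN value only, nothing is mutated).

-- rf = b.get("rag_flags") or {}   (first-match lookup; empty dict is falsy)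
def pvRagFlags (b : List (String × List (String × Bool))) : List (String × Bool) :=
  match List.lookup "rag_flags" b with
  | some v => if v = [] then [] else v
  | none => []

-- str(bool(rf.get(k, False)))
def pvFlagStr (rf : List (String × Bool)) (k : String) : String :=
  if (List.lookup k rf).getD false then "True" else "False"

-- ===== PORT A =====
def summarize_flags_py (bundles : List (List (String × List (String × Bool)))) : List (String × List (String × Int)) :=
  let key_counts : PySem.Dict String (PySem.Dict String Int) :=
    (["is_legal_lookup", "use_multi_article", "needs_expansion"]).foldl
      (fun kc k =>
        let c : PySem.Dict String Int :=
          bundles.foldl (fun c b =>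
            let rf := pvRagFlags b
            c.modify (pvFlagStr rf k) 0 (· + 1)) PySem.Dict.empty
        kc.insert k c) PySem.Dict.empty
  key_counts.items.map (fun p => (p.1, p.2.items))

-- ===== PORT B =====
def summarize_flags_py_alt (bundles : List (List (String × List (String × Bool)))) : List (String × List (String × Int)) :=
  let cs :=
    bundles.foldl
      (fun (cs : PySem.Dict String Int × PySem.Dict String Int × PySem.Dict String Int) b =>
        let rf := pvRagFlags b
        (cs.1.modify (pvFlagStr rf "is_legal_lookup") 0 (· + 1),
         cs.2.1.modify (pvFlagStr rf "use_multi_article") 0 (· + 1),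
         cs.2.2.modify (pvFlagStr rf "needs_expansion") 0 (· + 1)))
      (PySem.Dict.empty, PySem.Dict.empty, PySem.Dict.empty)
  [("is_legal_lookup", cs.1.items),
   ("use_multi_article", cs.2.1.items),
   ("needs_expansion", cs.2.2.items)]

-- ===== PRECONDITION & SPEC =====
def Spec_summarize_flags_py (bundles : List (List (String × List (String × Bool)))) (out : List (String × List (String × Int))) : Prop := out = summarize_flags_py_alt bundles
instance (bundles : List (List (String × List (String × Bool)))) (out : List (String × List (String × Int))) : Decidable (Spec_summarize_flags_py bundles out) := by unfold Spec_summarize_flags_py; infer_instance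

-- ===== CLAIM (what is proved, stated in full; the proofs are below) =====
def Claim_equal_summarize_flags_py : Prop := ∀ (bundles : List (List (String × List (String × Bool)))), Dom_summarize_flags_py bundles → Spec_summarize_flags_py bundles (summarize_flags_py bundles)

-- ===== LEMMAS AND PROOFS =====

-- one counting scan of A, for flag k, starting from c
def pvCountA (bundles : List (List (String × List (String × Bool)))) (k : String)
    (c : PySem.Dict String Int) : PySem.Dict String Int :=
  bundles.foldl (fun c b => c.modify (pvFlagStr (pvRagFlags b) k) 0 (· + 1)) c

-- B's one pass computes the three scans of A componentwise
theorem pvFold_triple (bundles : List (List (String × List (String × Bool))))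
    (c1 c2 c3 : PySem.Dict String Int) :
    bundles.foldl
      (fun (cs : PySem.Dict String Int × PySem.Dict String Int × PySem.Dict String Int) b =>
        let rf := pvRagFlags b
        (cs.1.modify (pvFlagStr rf "is_legal_lookup") 0 (· + 1),
         cs.2.1.modify (pvFlagStr rf "use_multi_article") 0 (· + 1),
         cs.2.2.modify (pvFlagStr rf "needs_expansion") 0 (· + 1)))
      (c1, c2, c3)
      = (pvCountA bundles "is_legal_lookup" c1,
         pvCountA bundles "use_multi_article" c2,
         pvCountA bundles "needs_expansion" c3) := by
  induction bundles generalizing c1 c2 c3 with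
  | nil => rfl
  | cons b rest ih => simp [pvCountA, List.foldl] at ih ⊢; exact ih _ _ _

-- ===== VERDICT (by name: the statement is the Claim_ definition above) =====
theorem summarize_flags_py_spec : Claim_equal_summarize_flags_py := by
  intro bundles _
  show summarize_flags_py bundles = summarize_flags_py_alt bundles
  unfold summarize_flags_py summarize_flags_py_alt
  rw [pvFold_triple]
  simp [pvCountA, List.foldl, PySem.Dict.items_insert, PySem.Dict.contains_insert,
    PySem.Dict.empty]
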